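-- pv_equiv track=rewrite | github.com/thasayus/cognition-inspired | myutils.py | convertMN1toMN2
-- ===== SOURCE A (Python) =====
-- def convertMN1toMN2(sentences1, x, y, change):
--     i = x
--     while i < len(sentences1):
--         sentence2 = sentences1[i]
--         ley = len(sentence2)
--         if (ley - y) > change:
--             return [i, y + change]
--         else:
--             if i == len(sentences1) - 1:
--                 return [i, ley - 1]
--             change -= (ley - y)
--             i += 1
--             y = 0
--     return None
-- ===== SOURCE B (Python) =====
-- def convertMN1toMN2(sentences1, x, y, change):
--     n = len(sentences1)
--     if x < 0 or x >= n:
--         return None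
--     prefix = [0]
--     for s in sentences1:
--         prefix.append(prefix[-1] + len(s))
--     target = prefix[x] + y + change
--     if target >= prefix[n]:
--         return [n - 1, len(sentences1[n - 1]) - 1]
--     i = x
--     while prefix[i + 1] <= target:
--         i += 1
--     return [i, target - prefix[i]]
-- ===== Notes on version B (the rewrite author's own statement) =====
-- stated objective: alternative
-- what changed: B precomputes a prefix-length array and one absolute target position, then locates the sentence by scanning the array, instead of A's loop that mutates y and change while walking the sentences.
-- intended difference: For -len(sentences1) <= x < 0 A silently wraps around via Python negative indexing and returns a position computed from that wrapped start (e.g. [-1, 0]); B returns None because x is out of range, which is the intended out-of-range behaviour. — e.g. on convertMN1toMN2(["ab"], -1, 0, 0): A returns some [-1, 0], B returns none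
import Mathlib
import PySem

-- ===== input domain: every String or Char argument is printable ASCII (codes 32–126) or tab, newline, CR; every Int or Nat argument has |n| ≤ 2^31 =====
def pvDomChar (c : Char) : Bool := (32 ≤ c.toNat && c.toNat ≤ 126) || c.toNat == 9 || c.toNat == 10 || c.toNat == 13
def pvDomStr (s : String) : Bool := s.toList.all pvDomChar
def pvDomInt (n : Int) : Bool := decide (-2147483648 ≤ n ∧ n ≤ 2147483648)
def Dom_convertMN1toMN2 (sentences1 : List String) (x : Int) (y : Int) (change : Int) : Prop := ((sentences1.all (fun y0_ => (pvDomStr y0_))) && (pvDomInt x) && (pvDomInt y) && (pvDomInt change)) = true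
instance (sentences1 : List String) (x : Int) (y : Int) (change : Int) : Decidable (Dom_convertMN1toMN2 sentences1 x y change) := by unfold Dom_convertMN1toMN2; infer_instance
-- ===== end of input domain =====

-- B replaces A's in-loop mutation of y/change by a precomputed pref-length array and one
-- absolute target position (objective: alternative); B returns None for negative x where A
-- wraps around (stated as D_ below).

-- ===== PORT A =====
-- while-loop of A: state (i, y, change); recursion measure = distance from i to the end.
def pvLoopA (sentences1 : List String) (i : Int) (y : Int) (change : Int) : Option (List Int) :=
  if _h : i < (sentences1.length : Int) then
    match PySem.List.pyGet? sentences1 i with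
    | none => none  -- IndexError (x < -len); excluded by Pre_convertMN1toMN2
    | some sentence2 =>
      let ley : Int := PySem.Str.len sentence2
      if ley - y > change then some [i, y + change]
      else if i = (sentences1.length : Int) - 1 then some [i, ley - 1]
      else pvLoopA sentences1 (i + 1) 0 (change - (ley - y))
  else none
termination_by ((sentences1.length : Int) - i).toNat
decreasing_by omega

def convertMN1toMN2 (sentences1 : List String) (x : Int) (y : Int) (change : Int) : Option (List Int) :=
  pvLoopA sentences1 x y change

-- ===== PORT B =====
-- pref = [0]; for s in sentences1: pref.append(pref[-1] + len(s))
def pvPrefix (sentences1 : List String) (acc : Int) : List Int :=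
  match sentences1 with
  | [] => [acc]
  | s :: rest => acc :: pvPrefix rest (acc + PySem.Str.len s)

-- while pref[i + 1] <= target: i += 1
def pvScan (pref : List Int) (i : Nat) (target : Int) : Nat :=
  if _h : i + 1 < pref.length then
    if pref.getD (i + 1) 0 ≤ target then pvScan pref (i + 1) target else i
  else i
termination_by pref.length - i

def convertMN1toMN2_alt (sentences1 : List String) (x : Int) (y : Int) (change : Int) : Option (List Int) :=
  let n := sentences1.length
  if x < 0 ∨ (n : Int) ≤ x then none
  else
    let pref := pvPrefix sentences1 0
    let target := pref.getD x.toNat 0 + y + change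
    if pref.getD n 0 ≤ target then
      some [(n : Int) - 1, PySem.Str.len (sentences1.getD (n - 1) "") - 1]
    else
      let i := pvScan pref x.toNat target
      some [(i : Int), target - pref.getD i 0]

-- ===== PRECONDITION & SPEC =====
-- Pre_ excludes exactly the inputs where A raises IndexError (x below -len(sentences1)).
def Pre_convertMN1toMN2 (sentences1 : List String) (x : Int) (y : Int) (change : Int) : Prop :=
  -(sentences1.length : Int) ≤ x
instance (sentences1 : List String) (x : Int) (y : Int) (change : Int) : Decidable (Pre_convertMN1toMN2 sentences1 x y change) := by unfold Pre_convertMN1toMN2; infer_instance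
def pvWitness_convertMN1toMN2 : List String × Int × Int × Int := (["ab", "cde"], 0, 1, 3)

-- For -len ≤ x < 0 A silently wraps around (Python negative indexing) and returns a position
-- computed from that wrapped start; B returns none (x out of range), the intended reading.
def D_convertMN1toMN2 (sentences1 : List String) (x : Int) (y : Int) (change : Int) : Prop := x < 0
instance (sentences1 : List String) (x : Int) (y : Int) (change : Int) : Decidable (D_convertMN1toMN2 sentences1 x y change) := by unfold D_convertMN1toMN2; infer_instance

def Spec_convertMN1toMN2 (sentences1 : List String) (x : Int) (y : Int) (change : Int) (out : Option (List Int)) : Prop := ¬ D_convertMN1toMN2 sentences1 x y change → out = convertMN1toMN2_alt sentences1 x y change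
instance (sentences1 : List String) (x : Int) (y : Int) (change : Int) (out : Option (List Int)) : Decidable (Spec_convertMN1toMN2 sentences1 x y change out) := by unfold Spec_convertMN1toMN2; infer_instance

def pvDiffWitness_convertMN1toMN2 : List String × Int × Int × Int := (["ab"], -1, 0, 0)
def pvDiffWitnessOut_convertMN1toMN2 : (Option (List Int)) × (Option (List Int)) := (some [-1, 0], none)

-- ===== CLAIM =====
def Claim_unchanged_convertMN1toMN2 : Prop := ∀ (sentences1 : List String) (x : Int) (y : Int) (change : Int), Dom_convertMN1toMN2 sentences1 x y change → Pre_convertMN1toMN2 sentences1 x y change → Spec_convertMN1toMN2 sentences1 x y change (convertMN1toMN2 sentences1 x y change)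
def Claim_changed_convertMN1toMN2 : Prop := Dom_convertMN1toMN2 (pvDiffWitness_convertMN1toMN2.1) (pvDiffWitness_convertMN1toMN2.2.1) (pvDiffWitness_convertMN1toMN2.2.2.1) (pvDiffWitness_convertMN1toMN2.2.2.2) ∧ Pre_convertMN1toMN2 (pvDiffWitness_convertMN1toMN2.1) (pvDiffWitness_convertMN1toMN2.2.1) (pvDiffWitness_convertMN1toMN2.2.2.1) (pvDiffWitness_convertMN1toMN2.2.2.2) ∧ D_convertMN1toMN2 (pvDiffWitness_convertMN1toMN2.1) (pvDiffWitness_convertMN1toMN2.2.1) (pvDiffWitness_convertMN1toMN2.2.2.1) (pvDiffWitness_convertMN1toMN2.2.2.2) ∧ convertMN1toMN2 (pvDiffWitness_convertMN1toMN2.1) (pvDiffWitness_convertMN1toMN2.2.1) (pvDiffWitness_convertMN1toMN2.2.2.1) (pvDiffWitness_convertMN1toMN2.2.2.2) = pvDiffWitnessOut_convertMN1toMN2.1 ∧ convertMN1toMN2_alt (pvDiffWitness_convertMN1toMN2.1) (pvDiffWitness_convertMN1toMN2.2.1) (pvDiffWitness_convertMN1toMN2.2.2.1) (pvDiffWitness_convertMN1toMN2.2.2.2)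 = pvDiffWitnessOut_convertMN1toMN2.2 ∧ pvDiffWitnessOut_convertMN1toMN2.1 ≠ pvDiffWitnessOut_convertMN1toMN2.2
def Claim_exact_convertMN1toMN2 : Prop := ∀ (sentences1 : List String) (x : Int) (y : Int) (change : Int), Dom_convertMN1toMN2 sentences1 x y change → Pre_convertMN1toMN2 sentences1 x y change → D_convertMN1toMN2 sentences1 x y change → convertMN1toMN2 sentences1 x y change ≠ convertMN1toMN2_alt sentences1 x y change

-- ===== LEMMAS AND PROOFS =====

theorem sumTake_step (L : List Int) (i : Nat) (h : i < L.length) :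
    (L.take (i + 1)).sum = (L.take i).sum + L[i] := by
  rw [List.take_add_one, List.sum_append]
  simp [List.getElem?_eq_getElem h]

theorem sumTake_mono (L : List Int) (h0 : ∀ a ∈ L, 0 ≤ a) (i j : Nat)
    (hij : i ≤ j) (hj : j ≤ L.length) : (L.take i).sum ≤ (L.take j).sum := by
  induction j with
  | zero => have : i = 0 := by omega
            simp [this]
  | succ k ih =>
    rcases Nat.lt_or_ge i (k + 1) with h | h
    · have h1 := ih (by omega) (by omega)
      rw [sumTake_step L k (by omega)]
      have h2 : 0 ≤ L[k] := h0 _ (List.getElem_mem _)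
      omega
    · have : i = k + 1 := by omega
      simp [this]

theorem pvPrefix_length (ss : List String) (a : Int) : (pvPrefix ss a).length = ss.length + 1 := by
  induction ss generalizing a with
  | nil => rfl
  | cons s rest ih => simp [pvPrefix, ih]

theorem pvPrefix_getD (ss : List String) (a : Int) (i : Nat) (h : i ≤ ss.length) :
    (pvPrefix ss a).getD i 0 = a + ((ss.map PySem.Str.len).take i).sum := by
  induction ss generalizing a i with
  | nil => have : i = 0 := by simpa using h
           simp [this, pvPrefix]
  | cons s rest ih =>
    cases i with
    | zero => simp [pvPrefix]
    | succ j =>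
      simp only [pvPrefix, List.getD_cons_succ, List.map_cons, List.take_succ_cons, List.sum_cons]
      rw [ih _ j (by simpa using h)]; ring

theorem strLen_nonneg (s : String) : 0 ≤ PySem.Str.len s := by
  rw [PySem.Str.len_eq]; positivity

theorem pvPrefix_step (ss : List String) (i : Nat) (h : i < ss.length) :
    (pvPrefix ss 0).getD (i + 1) 0 =
      (pvPrefix ss 0).getD i 0 + PySem.Str.len (ss.getD i "") := by
  rw [pvPrefix_getD ss 0 i (by omega), pvPrefix_getD ss 0 (i + 1) (by omega)]
  rw [sumTake_step _ i (by simpa using h)]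
  simp [List.getD_eq_getElem?_getD, List.getElem?_eq_getElem h]

theorem pvPrefix_mono (ss : List String) (i j : Nat) (hij : i ≤ j) (hj : j ≤ ss.length) :
    (pvPrefix ss 0).getD i 0 ≤ (pvPrefix ss 0).getD j 0 := by
  rw [pvPrefix_getD ss 0 i (by omega), pvPrefix_getD ss 0 j hj]
  have := sumTake_mono (ss.map PySem.Str.len)
    (by intro a ha; obtain ⟨s, _, rfl⟩ := List.mem_map.mp ha; exact strLen_nonneg s)
    i j hij (by simpa using hj)
  omega

-- main invariant: A's loop from a valid nonnegative index equals B's pref arithmetic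
theorem loopA_eq (ss : List String) (i : Nat) (y change : Int) (hi : i < ss.length) :
    pvLoopA ss (i : Int) y change =
      (let pre := pvPrefix ss 0
       let target := pre.getD i 0 + y + change
       if pre.getD ss.length 0 ≤ target then
         some [(ss.length : Int) - 1, PySem.Str.len (ss.getD (ss.length - 1) "") - 1]
       else
         some [((pvScan pre i target : Nat) : Int), target - pre.getD (pvScan pre i target) 0]) := by
  induction hn : ss.length - i generalizing i y change with
  | zero => omega
  | succ k ih =>
    rw [pvLoopA]
    have hlt : (i : Int) < (ss.length : Int) := by exact_mod_cast hi
    rw [dif_pos hlt, PySem.List.pyGet?_natCast, List.getElem?_eq_getElem hi]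
    simp only []
    set pre := pvPrefix ss 0 with hpre
    set ley := PySem.Str.len ss[i] with hley
    have hgetD : ss.getD i "" = ss[i] := by simp [List.getD_eq_getElem?_getD, List.getElem?_eq_getElem hi]
    have hstep : pre.getD (i + 1) 0 = pre.getD i 0 + ley := by
      rw [hpre, pvPrefix_step ss i hi, hgetD]
    have hpreLen : pre.length = ss.length + 1 := pvPrefix_length ss 0
    set target := pre.getD i 0 + y + change with htarget
    by_cases hc : ley - y > change
    · -- A returns [i, y + change]; target < pre[i+1] ≤ pre[n]
      rw [if_pos hc]
      have h1 : target < pre.getD (i + 1) 0 := by omega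
      have h2 : pre.getD (i + 1) 0 ≤ pre.getD ss.length 0 := pvPrefix_mono ss (i + 1) ss.length hi le_rfl
      rw [if_neg (by omega)]
      have hscan : pvScan pre i target = i := by
        rw [pvScan]; rw [dif_pos (by omega)]; rw [if_neg (by omega)]
      rw [hscan]
      have : y + change = target - pre.getD i 0 := by omega
      rw [this]
    · rw [if_neg hc]
      have hle : pre.getD (i + 1) 0 ≤ target := by omega
      by_cases hlast : (i : Int) = (ss.length : Int) - 1
      · -- last sentence: overflow clamp
        have hieq : i = ss.length - 1 := by omega
        have hlen : ss.length = i + 1 := by omega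
        rw [if_pos hlast]
        have hover : pre.getD ss.length 0 ≤ target := by rw [hlen]; omega
        rw [if_pos hover]
        have h2 : ss.getD (ss.length - 1) "" = ss[i] := by rw [← hieq]; exact hgetD
        rw [h2, ← hlast]
      · rw [if_neg hlast]
        have hi1 : i + 1 < ss.length := by omega
        have push : ((i : Int) + 1) = ((i + 1 : Nat) : Int) := by push_cast; ring
        rw [push, ih (i + 1) 0 (change - (ley - y)) hi1 (by omega)]
        simp only []
        have ht' : pre.getD (i + 1) 0 + 0 + (change - (ley - y)) = target := by omega
        rw [ht']
        by_cases hover : pre.getD ss.length 0 ≤ target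
        · rw [if_pos hover, if_pos hover]
        · rw [if_neg hover, if_neg hover]
          have hscan : pvScan pre i target = pvScan pre (i + 1) target := by
            rw [pvScan]; rw [dif_pos (by omega)]; rw [if_pos hle]
          rw [hscan]

-- A never returns none from a valid (possibly negative) start index
theorem loopA_ne_none (ss : List String) (i y change : Int)
    (h1 : -(ss.length : Int) ≤ i) (h2 : i < (ss.length : Int)) :
    pvLoopA ss i y change ≠ none := by
  induction hn : ((ss.length : Int) - i).toNat generalizing i y change with
  | zero => omega
  | succ k ih =>
    rw [pvLoopA, dif_pos h2]
    have hsome : ∃ s, PySem.List.pyGet? ss i = some s := by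
      cases hg : PySem.List.pyGet? ss i with
      | some s => exact ⟨s, rfl⟩
      | none =>
        exfalso
        have hni := (PySem.List.pyGet?_eq_none_iff ss i).mp hg
        exact hni (by simp [PySem.Raise.InRange]; omega)
    obtain ⟨s, hs⟩ := hsome
    rw [hs]
    simp only []
    by_cases hc : PySem.Str.len s - y > change
    · rw [if_pos hc]; simp
    · rw [if_neg hc]
      by_cases hlast : i = (ss.length : Int) - 1
      · rw [if_pos hlast]; simp
      · rw [if_neg hlast]
        exact ih (i + 1) 0 (change - (PySem.Str.len s - y)) (by omega) (by omega) (by omega)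

-- ===== VERDICT =====
theorem convertMN1toMN2_spec : Claim_unchanged_convertMN1toMN2 := by
  intro ss x y change _ _ hnd
  have hx : 0 ≤ x := by unfold D_convertMN1toMN2 at hnd; omega
  by_cases hlt : x < (ss.length : Int)
  · have hxi : x = ((x.toNat : Nat) : Int) := by omega
    have hi : x.toNat < ss.length := by omega
    unfold convertMN1toMN2 convertMN1toMN2_alt
    rw [hxi, loopA_eq ss x.toNat y change hi]
    rw [if_neg (show ¬(((x.toNat : Nat) : Int) < 0 ∨ (ss.length : Int) ≤ ((x.toNat : Nat) : Int)) by omega)]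
    simp only [Int.toNat_natCast]
  · unfold convertMN1toMN2 convertMN1toMN2_alt
    rw [pvLoopA, dif_neg hlt, if_pos (by omega)]

theorem convertMN1toMN2_changed : Claim_changed_convertMN1toMN2 := by
  unfold Claim_changed_convertMN1toMN2
  refine ⟨by decide, by decide, by decide, ?_, by decide, by decide⟩
  show convertMN1toMN2 ["ab"] (-1) 0 0 = some [-1, 0]
  unfold convertMN1toMN2
  rw [pvLoopA, dif_pos (by norm_num), PySem.List.pyGet?_neg_one]
  decide

theorem convertMN1toMN2_tight : Claim_exact_convertMN1toMN2 := by
  intro ss x y change _ hpre hd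
  unfold Pre_convertMN1toMN2 at hpre
  unfold D_convertMN1toMN2 at hd
  unfold convertMN1toMN2 convertMN1toMN2_alt
  have hne := loopA_ne_none ss x y change hpre (by omega)
  rw [if_pos (Or.inl hd)]
  exact hne
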